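-- pv_equiv track=rewrite | github.com/hanzala-sohrab/CP | Codeforces/2167D.py | solve
-- ===== SOURCE A (Python) =====
-- primes = [2, 3, 5, 7, 11, 13, 17, 19, 23, 29, 31, 37, 41, 43, 47, 53]
--
-- def solve(a):
--     m = int(1e18)
--     for p in primes:
--         for n in a:
--             if n % p != 0:
--                 m = min(m, p)
--                 break
--     return m
-- ===== SOURCE B (Python) =====
-- from functools import reduce
-- from math import gcd
--
-- primes = [2, 3, 5, 7, 11, 13, 17, 19, 23, 29, 31, 37, 41, 43, 47, 53]
--
-- def solve(a):
--     g = reduce(gcd, a, 0)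
--     for p in primes:
--         if g % p != 0:
--             return p
--     return int(1e18)
-- ===== Notes on version B (the rewrite author's own statement) =====
-- stated objective: simpler
-- what changed: B reduces the list to a single gcd and then returns the first prime not dividing that gcd, replacing A's nested primes-by-elements scan with min-accumulator by one aggregation pass plus a constant-size prime scan with early return.
import Mathlib
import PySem

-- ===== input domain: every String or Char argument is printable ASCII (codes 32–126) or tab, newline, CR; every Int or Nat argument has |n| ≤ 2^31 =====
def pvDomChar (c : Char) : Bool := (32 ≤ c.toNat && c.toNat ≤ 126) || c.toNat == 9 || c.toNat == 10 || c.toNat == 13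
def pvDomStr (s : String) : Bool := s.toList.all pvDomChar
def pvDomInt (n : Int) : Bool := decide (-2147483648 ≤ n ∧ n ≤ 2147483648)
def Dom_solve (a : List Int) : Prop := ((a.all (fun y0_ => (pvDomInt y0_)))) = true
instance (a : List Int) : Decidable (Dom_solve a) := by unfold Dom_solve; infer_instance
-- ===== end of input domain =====

-- B replaces A's nested primes-by-elements scan with a single gcd aggregation pass plus a
-- constant-size scan of the prime list (objective: simpler decomposition, no min accumulator).

-- ===== PORT A =====
def primesL : List Int := [2, 3, 5, 7, 11, 13, 17, 19, 23, 29, 31, 37, 41, 43, 47, 53]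

-- inner 'for n in a: if n % p != 0: m = min(m, p); break'
def solveInner (p m : Int) : List Int → Int
  | [] => m
  | n :: t => if PySem.Int.mod n p ≠ 0 then min m p else solveInner p m t

def solve (a : List Int) : Int :=
  primesL.foldl (fun m p => solveInner p m a) 1000000000000000000

-- ===== PORT B =====
-- g = reduce(gcd, a, 0); first prime with g % p != 0, else int(1e18)
def firstNotDvd (g : Int) : List Int → Int
  | [] => 1000000000000000000
  | p :: t => if PySem.Int.mod g p ≠ 0 then p else firstNotDvd g t

def solve_alt (a : List Int) : Int :=
  firstNotDvd (a.foldl (fun g n => (Int.gcd g n : Int)) 0) primesL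

-- ===== PRECONDITION & SPEC =====
def Spec_solve (a : List Int) (out : Int) : Prop := out = solve_alt a
instance (a : List Int) (out : Int) : Decidable (Spec_solve a out) := by unfold Spec_solve; infer_instance

-- ===== CLAIM (what is proved, stated in full; the proofs are below) =====
def Claim_equal_solve : Prop := ∀ (a : List Int), Dom_solve a → Spec_solve a (solve a)

-- ===== LEMMAS AND PROOFS =====

-- A's inner loop is: "does some element fail p-divisibility? then min m p else m"
theorem solveInner_eq (p m : Int) (a : List Int) :
    solveInner p m a = if ∃ n ∈ a, PySem.Int.mod n p ≠ 0 then min m p else m := by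
  induction a with
  | nil => simp [solveInner]
  | cons n t ih =>
      simp only [solveInner, ih, List.mem_cons, exists_eq_or_imp]
      by_cases h : PySem.Int.mod n p ≠ 0
      · simp [h]
      · simp [h]

-- an integer divides the running gcd iff it divides the seed and every element
theorem dvd_gcd_pair (p g n : Int) : p ∣ (Int.gcd g n : Int) ↔ p ∣ g ∧ p ∣ n := by
  constructor
  · exact fun h => ⟨h.trans (Int.gcd_dvd_left ..), h.trans (Int.gcd_dvd_right ..)⟩
  · rintro ⟨h1, h2⟩
    have h := Int.dvd_gcd (Int.natAbs_dvd.mpr h1) (Int.natAbs_dvd.mpr h2)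
    exact Int.natAbs_dvd.mp (Int.natCast_dvd_natCast.mpr h)

theorem dvd_foldl_gcd (p : Int) (a : List Int) : ∀ g : Int,
    p ∣ a.foldl (fun g n => (Int.gcd g n : Int)) g ↔ p ∣ g ∧ ∀ n ∈ a, p ∣ n := by
  induction a with
  | nil => intro g; simp
  | cons n t ih =>
      intro g
      simp only [List.foldl_cons, ih, dvd_gcd_pair, List.mem_cons, and_assoc]
      constructor
      · rintro ⟨hg, hn, ht⟩
        exact ⟨hg, fun x hx => hx.elim (fun e => e ▸ hn) (ht x)⟩
      · rintro ⟨hg, ht⟩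
        exact ⟨hg, ht n (Or.inl rfl), fun x hx => ht x (Or.inr hx)⟩

-- once the accumulator is ≤ every remaining prime, the fold never changes it
theorem foldA_const (a : List Int) (c : Int) (ps : List Int)
    (h : ∀ q ∈ ps, c ≤ q) : ps.foldl (fun m p => solveInner p m a) c = c := by
  induction ps with
  | nil => rfl
  | cons p t ih =>
      rw [List.foldl_cons, solveInner_eq]
      have hc : c ≤ p := h p (List.mem_cons_self ..)
      have he : (if ∃ n ∈ a, PySem.Int.mod n p ≠ 0 then min c p else c) = c := by
        split
        · exact min_eq_left hc
        · rfl
      rw [he]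
      exact ih (fun q hq => h q (List.mem_cons_of_mem _ hq))

-- the sorted fold with min-accumulator returns the first prime meeting the condition
theorem fold_eq_find (a : List Int) (g : Int)
    (hcond : ∀ p : Int, (∃ n ∈ a, PySem.Int.mod n p ≠ 0) ↔ PySem.Int.mod g p ≠ 0) :
    ∀ (ps : List Int) (m : Int), ps.Pairwise (· < ·) → (∀ p ∈ ps, p < m) →
      ps.foldl (fun m' p => solveInner p m' a) m =
        match ps.find? (fun p => PySem.Int.mod g p != 0) with
        | some p => p
        | none => m := by
  intro ps
  induction ps with
  | nil => intro m _ _; rfl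
  | cons p t ih =>
      intro m hpw hlt
      rw [List.foldl_cons, solveInner_eq]
      simp only [hcond p]
      by_cases hc : PySem.Int.mod g p ≠ 0
      · rw [if_pos hc]
        have hmp : min m p = p := min_eq_right (le_of_lt (hlt p (List.mem_cons_self ..)))
        rw [hmp, List.find?_cons_of_pos (by simpa using hc)]
        exact foldA_const a p t (fun q hq => le_of_lt ((List.pairwise_cons.mp hpw).1 q hq))
      · rw [if_neg hc, List.find?_cons_of_neg (by simpa using hc)]
        exact ih m (List.pairwise_cons.mp hpw).2
          (fun q hq => hlt q (List.mem_cons_of_mem _ hq))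

theorem firstNotDvd_eq_find (g : Int) (ps : List Int) :
    firstNotDvd g ps =
      match ps.find? (fun p => PySem.Int.mod g p != 0) with
      | some p => p
      | none => 1000000000000000000 := by
  induction ps with
  | nil => rfl
  | cons p t ih =>
      by_cases hc : PySem.Int.mod g p ≠ 0
      · rw [List.find?_cons_of_pos (by simpa using hc)]
        simp [firstNotDvd, hc]
      · rw [List.find?_cons_of_neg (by simpa using hc)]
        simp only [firstNotDvd, if_neg hc]
        exact ih

-- "some element fails p" iff "the gcd of the list fails p"
theorem cond_iff (a : List Int) (p : Int) :
    (∃ n ∈ a, PySem.Int.mod n p ≠ 0) ↔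
      PySem.Int.mod (a.foldl (fun g n => (Int.gcd g n : Int)) 0) p ≠ 0 := by
  rw [not_iff_not.symm]
  push Not
  rw [PySem.Int.mod_eq_zero_iff_dvd, dvd_foldl_gcd]
  simp [PySem.Int.mod_eq_zero_iff_dvd]

-- ===== VERDICT =====
theorem solve_spec : Claim_equal_solve := by
  intro a _
  unfold Spec_solve solve solve_alt
  rw [firstNotDvd_eq_find]
  exact fold_eq_find a _ (cond_iff a) primesL 1000000000000000000
    (by decide) (by decide)
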